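-- pv_equiv track=rewrite | github.com/RUB-SysSec/GeneratedMediaSurvey | analysis/convert_json.py | _parse_answers
-- ===== SOURCE A (Python) =====
-- from typing import Dict, List, Optional, Set, Tuple, Union
--
-- def _parse_answers(answers: Dict) -> Dict:
--     """Parses the question array into the different categories
--     """
--     tmp: Dict[str, List[Dict]] = {}
--     for answer in answers:
--         category = answer["category"]
--
--         entry: List[Dict] = tmp.get(category, [])
--         entry.append(answer)
--         tmp[category] = entry
--
--     result = {}
--     for key, val in tmp.items():
--         val = list(sorted(val, key=lambda x: x["question_id"]))
--         result[key] = val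
--
--     return result
-- ===== SOURCE B (Python) =====
-- def _parse_answers(answers):
--     """Group answers by category, each bucket ordered by question_id.
--
--     Different decomposition: sort the whole list once (stable, by
--     question_id), collect the distinct categories in first-occurrence
--     order, and build the result as a comprehension that filters the
--     sorted list per category -- no bucket dict is accumulated or
--     mutated.  Stability of the sort preserves A's tie order.
--     """
--     by_qid = sorted(answers, key=lambda x: x["question_id"])
--     cats = dict.fromkeys(a["category"] for a in answers)
--     return {c: [a for a in by_qid if a["category"] == c] for c in cats}
-- ===== Notes on version B (the rewrite author's own statement) =====
-- stated objective: alternative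
-- what changed: Instead of accumulating per-category buckets in a dict and then sorting each bucket, B sorts the whole list once (stable, by question_id), collects distinct categories in first-occurrence order, and builds each bucket by filtering the sorted list per category in a comprehension; no dict is mutated while grouping.
import Mathlib
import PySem

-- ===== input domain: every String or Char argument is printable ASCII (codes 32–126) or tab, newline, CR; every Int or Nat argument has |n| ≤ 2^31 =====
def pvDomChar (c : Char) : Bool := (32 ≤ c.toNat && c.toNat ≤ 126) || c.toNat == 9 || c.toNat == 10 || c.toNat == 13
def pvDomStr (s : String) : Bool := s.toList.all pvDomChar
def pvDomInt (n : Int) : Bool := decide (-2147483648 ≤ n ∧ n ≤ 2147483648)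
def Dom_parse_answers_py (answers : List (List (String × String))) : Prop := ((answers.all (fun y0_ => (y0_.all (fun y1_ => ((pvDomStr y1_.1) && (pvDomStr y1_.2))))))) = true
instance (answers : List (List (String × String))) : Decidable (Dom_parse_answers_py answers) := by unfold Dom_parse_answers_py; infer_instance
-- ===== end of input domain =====

-- B sorts the whole list once (stable, by question_id) and builds each category's bucket by
-- filtering that sorted list per distinct category, instead of A's accumulate-then-sort-each-bucket;
-- the proof is that stable sorting commutes with filtering.

-- answer[k]: first-match lookup in the association list (Python dict access); Pre_ guarantees the
-- key is present, so the "" default is never used on admitted inputs.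
def pvGet (a : List (String × String)) (k : String) : String :=
  (Option.map Prod.snd (a.find? (fun p => p.1 == k))).getD ""

-- ===== PORT A =====
def parse_answers_py (answers : List (List (String × String))) : List (String × List (List (String × String))) :=
  let tmp : PySem.Dict String (List (List (String × String))) :=
    answers.foldl (fun tmp answer =>
      let category := pvGet answer "category"
      let entry := tmp.getD category []
      tmp.insert category (entry ++ [answer])) PySem.Dict.empty
  let result : PySem.Dict String (List (List (String × String))) :=
    tmp.items.foldl (fun result kv =>
      result.insert kv.1 (PySem.List.sorted kv.2 (fun x => pvGet x "question_id") false))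
      PySem.Dict.empty
  result.items

-- ===== PORT B =====
-- dict.fromkeys → distinct categories in first-occurrence order (PySem.List.dedup);
-- the dict comprehension over those (distinct) keys is a fold of fresh inserts.
def parse_answers_py_alt (answers : List (List (String × String))) : List (String × List (List (String × String))) :=
  let by_qid := PySem.List.sorted answers (fun x => pvGet x "question_id") false
  let cats := PySem.List.dedup (answers.map (fun a => pvGet a "category"))
  (cats.foldl (fun r c =>
      r.insert c (by_qid.filter (fun a => pvGet a "category" == c)))
    (PySem.Dict.empty : PySem.Dict String (List (List (String × String))))).items

-- ===== PRECONDITION & SPEC =====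
-- Pre_ excludes exactly the inputs where the Python A raises KeyError: some answer lacking the
-- key "category" or the key "question_id".
def Pre_parse_answers_py (answers : List (List (String × String))) : Prop :=
  ∀ a ∈ answers, (a.find? (fun p => p.1 == "category")).isSome = true ∧
                 (a.find? (fun p => p.1 == "question_id")).isSome = true
instance (answers : List (List (String × String))) : Decidable (Pre_parse_answers_py answers) := by
  unfold Pre_parse_answers_py; infer_instance

def pvWitness_parse_answers_py : (List (List (String × String))) :=
  [[("category", "a"), ("question_id", "2")], [("category", "a"), ("question_id", "1")]]

def Spec_parse_answers_py (answers : List (List (String × String))) (out : List (String × List (List (String × String)))) : Prop := out = parse_answers_py_alt answers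
instance (answers : List (List (String × String))) (out : List (String × List (List (String × String)))) : Decidable (Spec_parse_answers_py answers out) := by unfold Spec_parse_answers_py; infer_instance

-- ===== CLAIM (what is proved, stated in full; the proofs are below) =====
def Claim_equal_parse_answers_py : Prop := ∀ (answers : List (List (String × String))), Dom_parse_answers_py answers → Pre_parse_answers_py answers → Spec_parse_answers_py answers (parse_answers_py answers)

-- ===== LEMMAS AND PROOFS =====

-- abbreviations for the two dict-lookups and the per-category bucket
def pvCat (a : List (String × String)) : String := pvGet a "category"
def pvQ (a : List (String × String)) : String := pvGet a "question_id"
def pvKeys (xs : List (List (String × String))) : List String := PySem.List.dedup (xs.map pvCat)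
def pvFlt (k : String) (xs : List (List (String × String))) : List (List (String × String)) :=
  xs.filter (fun a => pvCat a == k)
def pvDictA (xs : List (List (String × String))) : PySem.Dict String (List (List (String × String))) :=
  xs.foldl (fun tmp answer => tmp.insert (pvCat answer) (tmp.getD (pvCat answer) [] ++ [answer])) PySem.Dict.empty

lemma find?_beq_self (l : List String) (x : String) :
    l.find? (fun k => k == x) = if x ∈ l then some x else none := by
  induction l with
  | nil => simp
  | cons y ys ih =>
    by_cases h : y = x
    · subst h; simp
    · simp [h, ih, Ne.symm h]

lemma dedup_append (l : List String) (x : String) :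
    PySem.List.dedup (l ++ [x]) =
      if x ∈ PySem.List.dedup l then PySem.List.dedup l else PySem.List.dedup l ++ [x] := by
  simp [PySem.List.dedup, PySem.Set.ofList, List.foldl_append, PySem.Set.add]

lemma canon_find? {β : Type} (keys : List String) (g : String → β) (k : String) :
    List.find? (fun p => p.1 == k) (keys.map (fun k' => (k', g k'))) =
      if k ∈ keys then some (k, g k) else none := by
  rw [List.find?_map]
  have : ((fun (p : String × β) => p.1 == k) ∘ (fun k' => (k', g k'))) = fun k' => k' == k := rfl
  rw [this, find?_beq_self]
  split <;> simp

lemma canon_contains {β : Type} (keys : List String) (g : String → β) (k : String) :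
    (PySem.Dict.mk (keys.map (fun k' => (k', g k')))).contains k = decide (k ∈ keys) := by
  simp only [PySem.Dict.contains, List.any_map, Function.comp_def]
  induction keys with
  | nil => simp
  | cons y ys ih =>
    by_cases h : y = k
    · simp [h]
    · simp [h, ih, Ne.symm h]

lemma dict_eta {κ ν : Type} (d : PySem.Dict κ ν) : d = PySem.Dict.mk d.items := rfl

lemma groupA_items (xs : List (List (String × String))) :
    (pvDictA xs).items
      = (pvKeys xs).map (fun k => (k, pvFlt k xs)) := by
  unfold pvDictA
  induction xs using List.reverseRecOn with
  | nil => simp [PySem.Dict.empty, pvKeys, PySem.List.dedup, PySem.Set.ofList, PySem.Set.empty]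
  | append_singleton xs a ih =>
    rw [List.foldl_append]
    simp only [List.foldl_cons, List.foldl_nil]
    set D := xs.foldl (fun tmp answer =>
        tmp.insert (pvCat answer) (tmp.getD (pvCat answer) [] ++ [answer]))
        (PySem.Dict.empty : PySem.Dict String (List (List (String × String)))) with hD
    have hitems : D.items = (pvKeys xs).map (fun k => (k, pvFlt k xs)) := ih
    have hDmk : D = PySem.Dict.mk ((pvKeys xs).map (fun k => (k, pvFlt k xs))) := by
      rw [dict_eta D, hitems]
    have hK : pvKeys (xs ++ [a]) =
        if pvCat a ∈ pvKeys xs then pvKeys xs else pvKeys xs ++ [pvCat a] := by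
      simp only [pvKeys, List.map_append, List.map_cons, List.map_nil]
      exact dedup_append _ _
    have hget : D.getD (pvCat a) [] = if pvCat a ∈ pvKeys xs then pvFlt (pvCat a) xs else [] := by
      rw [hDmk]
      simp only [PySem.Dict.getD, PySem.Dict.get?, canon_find?]
      split <;> simp
    by_cases hmem : pvCat a ∈ pvKeys xs
    · have hcont : D.contains (pvCat a) = true := by
        rw [hDmk, canon_contains]; simpa using hmem
      rw [PySem.Dict.items_insert_of_contains _ _ hcont, hitems, hK, if_pos hmem,
        List.map_map, hget, if_pos hmem]
      apply List.map_congr_left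
      intro k hk
      simp only [Function.comp_apply]
      by_cases he : k = pvCat a
      · subst he
        simp [pvFlt, List.filter_append]
      · have : pvCat a ≠ k := Ne.symm he
        simp [he, pvFlt, List.filter_append, this]
    · have hcont : D.contains (pvCat a) = false := by
        rw [hDmk, canon_contains]; simpa using hmem
      rw [PySem.Dict.items_insert_of_not_contains _ _ hcont, hitems, hK, if_neg hmem,
        hget, if_neg hmem, List.map_append]
      have hflt0 : pvFlt (pvCat a) xs = [] := by
        rw [pvFlt, List.filter_eq_nil_iff]
        intro b hb
        simp only [beq_iff_eq]
        intro hcb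
        exact hmem (by rw [pvKeys, PySem.List.mem_dedup]; exact List.mem_map.mpr ⟨b, hb, hcb⟩)
      congr 1
      · apply List.map_congr_left
        intro k hk
        have hne : pvCat a ≠ k := fun h => hmem (h ▸ hk)
        simp [pvFlt, List.filter_append, hne]
      · simp [pvFlt, List.filter_append]
        intro b hb hcb
        exact hmem (by rw [pvKeys, PySem.List.mem_dedup]; exact List.mem_map.mpr ⟨b, hb, hcb⟩)

lemma foldl_insert_fresh {β β' : Type} (pairs : List (String × β)) (g : β → β')
    (e : PySem.Dict String β')
    (h : ∀ k ∈ pairs.map Prod.fst, e.contains k = false)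
    (hnd : (pairs.map Prod.fst).Nodup) :
    (pairs.foldl (fun r kv => r.insert kv.1 (g kv.2)) e).items
      = e.items ++ pairs.map (fun kv => (kv.1, g kv.2)) := by
  induction pairs generalizing e with
  | nil => simp
  | cons kv rest ih =>
    simp only [List.foldl_cons]
    have hc : e.contains kv.1 = false := h kv.1 (by simp)
    have hstep : (e.insert kv.1 (g kv.2)).items = e.items ++ [(kv.1, g kv.2)] :=
      PySem.Dict.items_insert_of_not_contains _ _ hc
    rw [ih (e.insert kv.1 (g kv.2)) ?_ (by simpa using hnd.of_cons), hstep]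
    · simp
    · intro k hk
      rw [PySem.Dict.contains_insert]
      have hne : k ≠ kv.1 := by
        simp only [List.map_cons, List.nodup_cons] at hnd
        exact fun he => hnd.1 (he ▸ hk)
      simp [hne, h k (by simp only [List.map_cons]; exact List.mem_cons_of_mem _ hk)]

lemma sorted_append {α κ : Type} [LinearOrder κ] (xs : List α) (x : α) (key : α → κ) :
    PySem.List.sorted (xs ++ [x]) key false =
      PySem.List.insertBy (fun a b => decide (key a < key b)) x (PySem.List.sorted xs key false) := by
  simp [PySem.List.sorted, List.foldl_append]

lemma filter_insertBy {α κ : Type} [LinearOrder κ] (key : α → κ) (p : α → Bool) (x : α)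
    (l : List α) (hl : l.Pairwise (fun a b => key a ≤ key b)) :
    (PySem.List.insertBy (fun a b => decide (key a < key b)) x l).filter p =
      if p x then PySem.List.insertBy (fun a b => decide (key a < key b)) x (l.filter p)
      else l.filter p := by
  induction l with
  | nil => simp [PySem.List.insertBy]; split <;> simp_all
  | cons y ys ih =>
    rw [List.pairwise_cons] at hl
    by_cases hb : key x < key y
    · have hins : PySem.List.insertBy (fun a b => decide (key a < key b)) x (y :: ys)
          = x :: y :: ys := by simp [PySem.List.insertBy, hb]
      rw [hins]
      by_cases hp : p x
      · simp only [hp, if_true]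
        rw [List.filter_cons_of_pos hp]
        rcases hfe : (y :: ys).filter p with _ | ⟨z, rest⟩
        · simp [PySem.List.insertBy]
        · have hz : z ∈ y :: ys := List.mem_of_mem_filter (hfe ▸ List.mem_cons_self ..)
          have hxz : key x < key z := by
            rcases hz with _ | hz'
            · exact hb
            · exact lt_of_lt_of_le hb (hl.1 z (by assumption))
          simp [PySem.List.insertBy, hxz]
      · rw [if_neg (by simp [hp]), List.filter_cons_of_neg (by simp [hp])]
    · have hins : PySem.List.insertBy (fun a b => decide (key a < key b)) x (y :: ys)
          = y :: PySem.List.insertBy (fun a b => decide (key a < key b)) x ys := by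
        simp [PySem.List.insertBy, hb]
      rw [hins]
      by_cases hpy : p y
      · rw [List.filter_cons_of_pos hpy, ih hl.2, List.filter_cons_of_pos hpy]
        by_cases hp : p x
        · simp only [hp, if_true]
          simp [PySem.List.insertBy, hb]
        · simp [hp]
      · rw [List.filter_cons_of_neg (by simp [hpy]), ih hl.2,
          List.filter_cons_of_neg (by simp [hpy])]

lemma sorted_filter {α κ : Type} [LinearOrder κ] (key : α → κ) (p : α → Bool) (xs : List α) :
    PySem.List.sorted (xs.filter p) key false = (PySem.List.sorted xs key false).filter p := by
  induction xs using List.reverseRecOn with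
  | nil => simp [PySem.List.sorted]
  | append_singleton xs x ih =>
    rw [List.filter_append, sorted_append,
      filter_insertBy key p x _ (PySem.List.sorted_pairwise xs key)]
    by_cases hp : p x
    · simp only [hp, if_true]
      rw [← ih, List.filter_cons_of_pos hp, List.filter_nil, sorted_append]
    · rw [if_neg (by simp [hp]), ← ih, List.filter_cons_of_neg (by simp [hp]),
        List.filter_nil, List.append_nil]

lemma keys_nodup (xs : List (List (String × String))) : (pvKeys xs).Nodup :=
  PySem.List.nodup_dedup (xs.map pvCat)

lemma foldl_insert_keys {β : Type} (keys : List String) (g : String → β)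
    (e : PySem.Dict String β)
    (h : ∀ k ∈ keys, e.contains k = false) (hnd : keys.Nodup) :
    (keys.foldl (fun r k => r.insert k (g k)) e).items
      = e.items ++ keys.map (fun k => (k, g k)) := by
  induction keys generalizing e with
  | nil => simp
  | cons k rest ih =>
    simp only [List.foldl_cons]
    have hc : e.contains k = false := h k (by simp)
    have hstep : (e.insert k (g k)).items = e.items ++ [(k, g k)] :=
      PySem.Dict.items_insert_of_not_contains _ _ hc
    rw [ih (e.insert k (g k)) ?_ hnd.of_cons, hstep]
    · simp
    · intro k' hk'
      rw [PySem.Dict.contains_insert]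
      have hne : k' ≠ k := fun he => (List.nodup_cons.mp hnd).1 (he ▸ hk')
      simp [hne, h k' (List.mem_cons_of_mem _ hk')]

lemma parse_answers_eq (xs : List (List (String × String))) :
    parse_answers_py xs = parse_answers_py_alt xs := by
  have hA : parse_answers_py xs
      = ((pvDictA xs).items.foldl
          (fun r kv => r.insert kv.1 (PySem.List.sorted kv.2 pvQ false)) PySem.Dict.empty).items := rfl
  rw [hA, groupA_items]
  show _ = ((PySem.List.dedup (xs.map pvCat)).foldl
      (fun r c => r.insert c ((PySem.List.sorted xs pvQ false).filter (fun a => pvCat a == c)))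
      (PySem.Dict.empty : PySem.Dict String (List (List (String × String))))).items
  rw [foldl_insert_fresh _ (fun v => PySem.List.sorted v pvQ false) _
      (by intro k hk; rfl)
      (by simp only [List.map_map, Function.comp_def]
          rw [List.map_id_fun']
          exact keys_nodup xs)]
  rw [foldl_insert_keys (PySem.List.dedup (xs.map pvCat))
      (fun k => (PySem.List.sorted xs pvQ false).filter (fun a => pvCat a == k)) _
      (by intro k hk; rfl) (keys_nodup xs)]
  simp only [List.map_map, Function.comp_def]
  show _ = (pvKeys xs).map _
  apply List.map_congr_left
  intro k hk
  exact congrArg (k, ·) (sorted_filter pvQ (fun a => pvCat a == k) xs)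

-- ===== VERDICT (by name: the statement is the Claim_ definition above) =====
theorem parse_answers_py_spec : Claim_equal_parse_answers_py := by
  intro answers _ _
  unfold Spec_parse_answers_py
  exact parse_answers_eq answers
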